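-- pv_equiv track=rewrite | github.com/Jeetsatishv/Introduction-to-Computer-Science-1 | Problem Set 3/ps3pr2.py | cube_evens_rec
-- ===== SOURCE A (Python) =====
-- def cube_evens_rec(values):
--     '''This function returns the cubes of even numbers in values'''
--     if values==[]:
--             return []
--     else:
--         x = cube_evens_rec(values[1:])
--         if values[0]%2==0:
--             z = values[0]**3
--             return [z] + x
--         else:
--             return x
-- ===== SOURCE B (Python) =====
-- def cube_evens_rec(values):
--     '''This function returns the cubes of even numbers in values'''
--     result = []
--     for v in values:
--         if v % 2 == 0:
--             result.append(v ** 3)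
--     return result
-- ===== Notes on version B (the rewrite author's own statement) =====
-- stated objective: idiomatic
-- what changed: Replaced recursion over the tail (building [z] + rest via call-stack returns) with a single flat iterative pass appending to an accumulator list.
import Mathlib
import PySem

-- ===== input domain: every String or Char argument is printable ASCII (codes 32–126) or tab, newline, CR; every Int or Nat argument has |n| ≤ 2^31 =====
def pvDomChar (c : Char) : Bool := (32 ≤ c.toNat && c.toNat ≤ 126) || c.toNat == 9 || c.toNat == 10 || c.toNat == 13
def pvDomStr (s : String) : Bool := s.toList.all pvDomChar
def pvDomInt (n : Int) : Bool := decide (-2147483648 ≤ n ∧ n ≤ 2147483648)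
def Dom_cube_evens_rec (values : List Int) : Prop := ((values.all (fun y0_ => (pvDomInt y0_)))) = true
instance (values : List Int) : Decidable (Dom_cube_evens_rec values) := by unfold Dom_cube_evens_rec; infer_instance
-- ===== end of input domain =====

-- B replaces tail recursion (with slicing/concatenation) by one flat accumulator pass; return-value equivalence.
-- ===== PORT A =====
def cube_evens_rec (values : List Int) : List Int :=
  if values = [] then []
  else
    let x := cube_evens_rec (PySem.List.slice values (some 1) none)
    match values with
    | [] => x
    | v :: _ =>
      if PySem.Int.mod v 2 = 0 then
        let z := v ^ 3
        [z] ++ x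
      else x
termination_by values.length
decreasing_by simp_all [PySem.List.slice_from_one]; cases values <;> simp_all

-- ===== PORT B =====
def cube_evens_rec_alt (values : List Int) : List Int :=
  values.foldl (fun result v => if PySem.Int.mod v 2 = 0 then result ++ [v ^ 3] else result) []

-- ===== PRECONDITION & SPEC =====
def Spec_cube_evens_rec (values : List Int) (out : List Int) : Prop := out = cube_evens_rec_alt values
instance (values : List Int) (out : List Int) : Decidable (Spec_cube_evens_rec values out) := by unfold Spec_cube_evens_rec; infer_instance

-- ===== CLAIM (what is proved, stated in full; the proofs are below) =====
def Claim_equal_cube_evens_rec : Prop := ∀ (values : List Int), Dom_cube_evens_rec values → Spec_cube_evens_rec values (cube_evens_rec values)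

-- ===== LEMMAS AND PROOFS =====

-- ===== VERDICT (by name: the statement is the Claim_ definition above) =====
theorem alt_eq_filter_map (values : List Int) :
    cube_evens_rec_alt values = (values.filter (fun v => PySem.Int.mod v 2 = 0)).map (fun v => v ^ 3) := by
  simpa [cube_evens_rec_alt] using PySem.List.foldl_append_if (fun v => PySem.Int.mod v 2 = 0) (fun v : Int => v ^ 3) values []

theorem a_eq_filter_map (values : List Int) :
    cube_evens_rec values = (values.filter (fun v => PySem.Int.mod v 2 = 0)).map (fun v => v ^ 3) := by
  induction values with
  | nil => simp [cube_evens_rec]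
  | cons v vs ih =>
    rw [cube_evens_rec]
    simp [PySem.List.slice_from_one, ih, List.filter_cons]
    split_ifs <;> simp

theorem cube_evens_rec_spec : Claim_equal_cube_evens_rec := by
  intro values _
  unfold Spec_cube_evens_rec
  rw [alt_eq_filter_map, a_eq_filter_map]
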